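-- pv_equiv track=rewrite | github.com/lilkinz16/roulette-analyzer | streamlit_app.py | build_big_road
-- ===== SOURCE A (Python) =====
-- def build_big_road(sequence):
--     grid = [[None for _ in range(100)] for _ in range(6)]
--     col = 0
--     row = 0
--     prev = ''
--     for ch in sequence:
--         if ch == 'T': continue
--         if ch == prev:
--             row += 1
--             if row >= 6:
--                 row = 5
--                 col += 1
--         else:
--             row = 0
--             if prev != '':
--                 col += 1
--         grid[row][col] = ch
--         prev = ch
--     return grid
-- ===== SOURCE B (Python) =====
-- def _runs(xs):
--     """Maximal runs of consecutive equal elements as (element, length) pairs."""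
--     if not xs:
--         return []
--     runs = []
--     cur = xs[0]
--     n = 1
--     for ch in xs[1:]:
--         if ch == cur:
--             n += 1
--         else:
--             runs.append((cur, n))
--             cur, n = ch, 1
--     runs.append((cur, n))
--     return runs
--
--
-- def build_big_road(sequence):
--     grid = [[None] * 100 for _ in range(6)]
--     col = 0
--     for ch, length in _runs([c for c in sequence if c != 'T']):
--         for i in range(length):
--             if i < 6:
--                 grid[i][col] = ch
--             else:
--                 col += 1
--                 grid[5][col] = ch
--         col += 1
--     return grid
-- ===== Notes on version B (the rewrite author's own statement) =====
-- stated objective: alternative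
-- what changed: B first filters out tie markers, groups the remaining outcomes into maximal runs of equal characters, and places each whole run at once (one column per run, dragon tail past row 5) instead of A's per-character state machine tracking prev/row/col.
import Mathlib
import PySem

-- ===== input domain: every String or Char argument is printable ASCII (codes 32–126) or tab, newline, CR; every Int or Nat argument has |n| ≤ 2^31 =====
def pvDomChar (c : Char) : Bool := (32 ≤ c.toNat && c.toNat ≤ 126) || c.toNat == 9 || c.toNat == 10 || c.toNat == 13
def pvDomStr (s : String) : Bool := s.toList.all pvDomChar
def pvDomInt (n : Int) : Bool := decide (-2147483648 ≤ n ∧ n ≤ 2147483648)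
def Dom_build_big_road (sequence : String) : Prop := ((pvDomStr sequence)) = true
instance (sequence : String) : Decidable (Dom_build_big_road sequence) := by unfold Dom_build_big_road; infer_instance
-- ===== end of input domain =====

-- B rebuilds the grid from maximal runs of the T-filtered sequence instead of A's
-- per-character row/col/prev state machine; objective: alternative decomposition (same cost).

-- ===== PORT A =====
-- write grid[r][c] := ch; out-of-range writes cannot occur inside Pre_ (Python would raise IndexError there)
def setCell (g : List (List (Option String))) (r c : Nat) (v : String) : List (List (Option String)) :=
  g.modify r (fun row => row.set c (some v))

def emptyGrid : List (List (Option String)) :=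
  List.replicate 6 (List.replicate 100 none)

-- A's loop body; prev = '' is encoded as none, prev = ch (a 1-char string) as some ch
def stepA (st : List (List (Option String)) × Nat × Nat × Option Char) (ch : Char) :
    List (List (Option String)) × Nat × Nat × Option Char :=
  let (grid, col, row, prev) := st
  if ch = 'T' then st
  else if some ch = prev then
    let row' := row + 1
    if row' ≥ 6 then (setCell grid 5 (col + 1) (String.mk [ch]), col + 1, 5, some ch)
    else (setCell grid row' col (String.mk [ch]), col, row', some ch)
  else
    let col' := if prev ≠ none then col + 1 else col
    (setCell grid 0 col' (String.mk [ch]), col', 0, some ch)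

def build_big_road (sequence : String) : List (List (Option String)) :=
  (sequence.toList.foldl stepA (emptyGrid, 0, 0, none)).1

-- ===== PORT B =====
-- _runs from Source B: fold carrying (finished runs, current char, current count), then close the last run
def runsOf (xs : List Char) : List (Char × Nat) :=
  match xs with
  | [] => []
  | c :: rest =>
    let (runs, cur, n) := rest.foldl
      (fun (st : List (Char × Nat) × Char × Nat) ch =>
        let (runs, cur, n) := st
        if ch = cur then (runs, cur, n + 1) else (runs ++ [(cur, n)], ch, 1))
      ([], c, 1)
    runs ++ [(cur, n)]

-- the inner `for i in range(length)` loop body of Source B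
def bstep (ch : Char) (st : List (List (Option String)) × Nat) (i : Nat) :
    List (List (Option String)) × Nat :=
  let (g, col) := st
  if i < 6 then (setCell g i col (String.mk [ch]), col)
  else (setCell g 5 (col + 1) (String.mk [ch]), col + 1)

def placeRun (st : List (List (Option String)) × Nat) (r : Char × Nat) :
    List (List (Option String)) × Nat :=
  let (g, col) := (List.range r.2).foldl (bstep r.1) st
  (g, col + 1)

def build_big_road_alt (sequence : String) : List (List (Option String)) :=
  ((runsOf (sequence.toList.filter (fun c => c ≠ 'T'))).foldl placeRun (emptyGrid, 0)).1

-- ===== PRECONDITION & SPEC =====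
-- run lengths of a list (independent of both ports; used only to state Pre_)
def pvRunLenGo (c : Char) (n : Nat) : List Char → List Nat
  | [] => [n]
  | d :: rest => if d = c then pvRunLenGo c (n + 1) rest else n :: pvRunLenGo d 1 rest

def pvColsNeeded (xs : List Char) : Nat :=
  match xs with
  | [] => 0
  | c :: rest => ((pvRunLenGo c 1 rest).map (fun L => max 1 (L - 5))).sum

-- Pre_ holds exactly when all writes fit in the 100 columns; beyond it Python A raises IndexError
def Pre_build_big_road (sequence : String) : Prop :=
  pvColsNeeded (sequence.toList.filter (fun c => c ≠ 'T')) ≤ 100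
instance (sequence : String) : Decidable (Pre_build_big_road sequence) := by
  unfold Pre_build_big_road; infer_instance

def pvWitness_build_big_road : String := "PPBBPT"

def Spec_build_big_road (sequence : String) (out : List (List (Option String))) : Prop := out = build_big_road_alt sequence
instance (sequence : String) (out : List (List (Option String))) : Decidable (Spec_build_big_road sequence out) := by unfold Spec_build_big_road; infer_instance

-- ===== CLAIM (what is proved, stated in full; the proofs are below) =====
def Claim_equal_build_big_road : Prop := ∀ (sequence : String), Dom_build_big_road sequence → Pre_build_big_road sequence → Spec_build_big_road sequence (build_big_road sequence)

-- ===== LEMMAS AND PROOFS =====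

-- structural-recursion form of runsOf
def rgo (c : Char) (n : Nat) : List Char → List (Char × Nat)
  | [] => [(c, n)]
  | d :: rest => if d = c then rgo c (n + 1) rest else (c, n) :: rgo d 1 rest

theorem runsOf_go (rest : List Char) : ∀ (acc : List (Char × Nat)) (c : Char) (n : Nat),
    (let (runs, cur, m) := rest.foldl
      (fun (st : List (Char × Nat) × Char × Nat) ch =>
        let (runs, cur, n) := st
        if ch = cur then (runs, cur, n + 1) else (runs ++ [(cur, n)], ch, 1))
      (acc, c, n)
     runs ++ [(cur, m)]) = acc ++ rgo c n rest := by
  induction rest with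
  | nil => intro acc c n; simp [rgo]
  | cons d rest ih =>
    intro acc c n
    by_cases h : d = c
    · simp [rgo, h, List.foldl_cons, ih]
    · simp [rgo, h, List.foldl_cons, ih]

theorem runsOf_eq (c : Char) (rest : List Char) : runsOf (c :: rest) = rgo c 1 rest := by
  have := runsOf_go rest [] c 1
  simpa [runsOf] using this

theorem stepA_T (st : List (List (Option String)) × Nat × Nat × Option Char) : stepA st 'T' = st := by
  simp [stepA]

theorem foldl_stepA_filter (xs : List Char) :
    ∀ st, xs.foldl stepA st = (xs.filter (fun c => c ≠ 'T')).foldl stepA st := by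
  induction xs with
  | nil => intro st; rfl
  | cons x xs ih =>
    intro st
    by_cases h : x = 'T'
    · simp [h, stepA_T, ih]
    · simp [h, ih]

theorem bcol (ch : Char) : ∀ (j : Nat) (g : List (List (Option String))) (c0 : Nat),
    ((List.range j).foldl (bstep ch) (g, c0)).2 = c0 + (j - 6) := by
  intro j
  induction j with
  | zero => intro g c0; simp
  | succ j ih =>
    intro g c0
    rw [List.range_succ, List.foldl_append]
    simp only [List.foldl_cons, List.foldl_nil]
    rcases h : (List.range j).foldl (bstep ch) (g, c0) with ⟨G, C⟩
    have hc : C = c0 + (j - 6) := by have := ih g c0; rw [h] at this; exact this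
    by_cases hj : j < 6
    · simp [bstep, hj, hc]; omega
    · simp [bstep, hj, hc]; omega

-- the main invariant: after i ≥ 1 characters of the current run, A's state equals
-- B's partial fold over range i, and the remaining fold equals B's fold over the remaining runs
theorem mid : ∀ (rest : List Char) (c : Char) (i : Nat) (g : List (List (Option String))) (c0 : Nat),
    1 ≤ i → (∀ x ∈ rest, x ≠ 'T') →
    (rest.foldl stepA (((List.range i).foldl (bstep c) (g, c0)).1, c0 + (i - 6), min (i - 1) 5, some c)).1
      = ((rgo c i rest).foldl placeRun (g, c0)).1 := by
  intro rest
  induction rest with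
  | nil =>
    intro c i g c0 hi _
    simp [rgo, placeRun]
  | cons d rest ih =>
    intro c i g c0 hi hT
    have hdT : d ≠ 'T' := hT d (by simp)
    have hTrest : ∀ x ∈ rest, x ≠ 'T' := fun x hx => hT x (by simp [hx])
    by_cases h : d = c
    · -- run continues
      subst h
      rw [rgo, if_pos rfl]
      rw [List.foldl_cons]
      have hstep : stepA (((List.range i).foldl (bstep d) (g, c0)).1, c0 + (i - 6), min (i - 1) 5, some d) d
          = (((List.range (i + 1)).foldl (bstep d) (g, c0)).1, c0 + (i + 1 - 6), min (i + 1 - 1) 5, some d) := by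
        rw [List.range_succ, List.foldl_append]
        simp only [List.foldl_cons, List.foldl_nil]
        rcases hB : (List.range i).foldl (bstep d) (g, c0) with ⟨G, C⟩
        have hc : C = c0 + (i - 6) := by have := bcol d i g c0; rw [hB] at this; exact this
        by_cases hi6 : i < 6
        · have h2 : min (i - 1) 5 + 1 = i := by omega
          have h3 : ¬ (6 ≤ i) := by omega
          have h4 : i - 6 = 0 := by omega
          have h5 : i + 1 - 6 = 0 := by omega
          have h6 : min (i + 1 - 1) 5 = i := by omega
          simp [stepA, hdT, bstep, h2, h3, h4, h5, hc]
          exact ⟨by simp [hi6], by omega⟩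
        · have h1 : min (i - 1) 5 + 1 ≥ 6 := by omega
          have h2 : ¬ (i < 6) := hi6
          have h3 : c0 + (i - 6) + 1 = c0 + (i + 1 - 6) := by omega
          simp [stepA, hdT, bstep, h1, h2, h3, hc]
          omega
      rw [hstep]
      exact ih d (i + 1) g c0 (by omega) hTrest
    · -- new run starts
      rw [rgo]
      simp only [if_neg h]
      rw [List.foldl_cons, List.foldl_cons]
      have hplace : placeRun (g, c0) (c, i) = (((List.range i).foldl (bstep c) (g, c0)).1, c0 + (i - 6) + 1) := by
        simp only [placeRun]
        rcases hB : (List.range i).foldl (bstep c) (g, c0) with ⟨G, C⟩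
        have hc : C = c0 + (i - 6) := by have := bcol c i g c0; rw [hB] at this; exact this
        simp [hc]
      have hstep : stepA (((List.range i).foldl (bstep c) (g, c0)).1, c0 + (i - 6), min (i - 1) 5, some c) d
          = (setCell ((List.range i).foldl (bstep c) (g, c0)).1 0 (c0 + (i - 6) + 1) (String.mk [d]),
             c0 + (i - 6) + 1, 0, some d) := by
        have hdc : ¬ (some d = some c) := by simp [h]
        simp [stepA, hdT, hdc]
      rw [hstep, hplace]
      have h1 : (List.range 1).foldl (bstep d) (((List.range i).foldl (bstep c) (g, c0)).1, c0 + (i - 6) + 1)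
          = (setCell ((List.range i).foldl (bstep c) (g, c0)).1 0 (c0 + (i - 6) + 1) (String.mk [d]), c0 + (i - 6) + 1) := by
        simp [List.range_succ, bstep]
      have := ih d 1 ((List.range i).foldl (bstep c) (g, c0)).1 (c0 + (i - 6) + 1) (by omega) hTrest
      rw [h1] at this
      simpa using this

theorem main_list (ys : List Char) (hT : ∀ x ∈ ys, x ≠ 'T') :
    (ys.foldl stepA (emptyGrid, 0, 0, none)).1 = ((runsOf ys).foldl placeRun (emptyGrid, 0)).1 := by
  cases ys with
  | nil => rfl
  | cons c rest =>
    have hcT : c ≠ 'T' := hT c (List.mem_cons_self ..)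
    have hTrest : ∀ x ∈ rest, x ≠ 'T' := fun x hx => hT x (List.mem_cons_of_mem _ hx)
    rw [runsOf_eq, List.foldl_cons]
    have hstep : stepA (emptyGrid, 0, 0, none) c
        = (((List.range 1).foldl (bstep c) (emptyGrid, 0)).1, 0 + (1 - 6), min (1 - 1) 5, some c) := by
      simp [stepA, hcT, List.range_succ, bstep]
    rw [hstep]
    exact mid rest c 1 emptyGrid 0 (by omega) hTrest

theorem main_eq (sequence : String) : build_big_road sequence = build_big_road_alt sequence := by
  unfold build_big_road build_big_road_alt
  rw [foldl_stepA_filter]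
  exact main_list _ (fun x hx => by simpa using (List.of_mem_filter hx))

-- ===== VERDICT (by name: the statement is the Claim_ definition above) =====
theorem build_big_road_spec : Claim_equal_build_big_road := by
  intro sequence _ _
  unfold Spec_build_big_road
  exact main_eq sequence
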